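-- pv_equiv track=rewrite | github.com/JehooJeon/Algorithm | 한_권으로_끝내는_코딩_테스트(with.파이썬)/Chapter_2_자료구조/2-1-5.py | solution
-- ===== SOURCE A (Python) =====
-- def solution(n, A, i1, j1, i2, j2, k):
--     for i in range(i1, i2 + 1):
--         for j in range(j1, j2 + 1):
--             A[i][j] *= k
--
--     answer = 0
--     for arr in A:
--         answer += sum(arr)
--
--     return answer
-- ===== SOURCE B (Python) =====
-- def solution(n, A, i1, j1, i2, j2, k):
--     # Closed-form delta: total sum plus (k-1) times the submatrix sum (no second pass).
--     # Does NOT mutate A (A scales the submatrix in place); return value only.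
--     total = sum(map(sum, A))
--     if i1 > i2 or j1 > j2:
--         return total
--     boost = sum(sum(row[j1:j2 + 1]) for row in A[i1:i2 + 1])
--     return total + (k - 1) * boost
-- ===== Notes on version B (the rewrite author's own statement) =====
-- stated objective: alternative
-- what changed: Instead of A's two passes (a per-cell loop that scales the submatrix in place, then a full re-summation), B computes the total sum once and adds (k-1) times the submatrix sum obtained from list slices, mutating nothing.
-- outside the precondition, e.g. on solution(2, [[1, 2], [3, 4]], -1, 0, -1, 0, 10): A returns 37, B returns 10
import Mathlib
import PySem

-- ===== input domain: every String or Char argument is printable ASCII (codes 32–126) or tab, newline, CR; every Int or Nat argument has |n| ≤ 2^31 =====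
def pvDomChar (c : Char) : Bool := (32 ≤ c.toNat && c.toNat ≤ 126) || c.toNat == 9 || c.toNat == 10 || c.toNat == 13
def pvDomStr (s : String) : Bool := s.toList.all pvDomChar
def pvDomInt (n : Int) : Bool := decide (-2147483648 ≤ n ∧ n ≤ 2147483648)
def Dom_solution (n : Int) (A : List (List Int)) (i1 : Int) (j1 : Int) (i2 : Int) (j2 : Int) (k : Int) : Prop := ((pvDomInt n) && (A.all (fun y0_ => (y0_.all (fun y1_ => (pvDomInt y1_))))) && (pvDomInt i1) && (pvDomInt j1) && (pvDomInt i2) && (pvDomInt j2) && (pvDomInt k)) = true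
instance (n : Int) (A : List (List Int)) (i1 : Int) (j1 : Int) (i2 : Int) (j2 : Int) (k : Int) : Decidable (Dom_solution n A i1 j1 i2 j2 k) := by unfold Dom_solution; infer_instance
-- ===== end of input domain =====

-- B replaces A's two passes (in-place submatrix scaling, then full re-summation) by the
-- closed-form delta  total + (k-1) * submatrix-sum  computed from slices (alternative algorithm,
-- same cost); B does not mutate A (A scales the submatrix in place) — the equivalence proved
-- here is about the RETURN value only.

-- ===== PORT A =====
-- A[i][j] *= k  (fetch row, fetch cell, write back; Python negative indices handled by pyGet?/pySetD)
def pyScaleCell (m : List (List Int)) (i : Int) (j : Int) (k : Int) : List (List Int) :=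
  match PySem.List.pyGet? m i with
  | none => m
  | some row =>
    match PySem.List.pyGet? row j with
    | none => m
    | some v => PySem.List.pySetD m i (PySem.List.pySetD row j (v * k))

def solution (n : Int) (A : List (List Int)) (i1 : Int) (j1 : Int) (i2 : Int) (j2 : Int) (k : Int) : Int :=
  let m := (PySem.List.pyRange i1 (i2 + 1) 1).foldl
    (fun m i => (PySem.List.pyRange j1 (j2 + 1) 1).foldl (fun m' j => pyScaleCell m' i j k) m) A
  m.foldl (fun acc arr => acc + arr.foldl (· + ·) 0) 0

-- ===== PORT B =====
def solution_alt (n : Int) (A : List (List Int)) (i1 : Int) (j1 : Int) (i2 : Int) (j2 : Int) (k : Int) : Int :=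
  let total := (A.map (fun row => row.foldl (· + ·) 0)).foldl (· + ·) 0
  if i1 > i2 ∨ j1 > j2 then total
  else total + (k - 1) *
    ((PySem.List.slice A (some i1) (some (i2 + 1))).map
      (fun row => (PySem.List.slice row (some j1) (some (j2 + 1))).foldl (· + ·) 0)).foldl (· + ·) 0

-- ===== PRECONDITION & SPEC =====
-- Pre_ restricts to the natural domain of 0-based submatrix coordinates: when both index
-- ranges are nonempty they must lie within bounds.  It excludes inputs where A raises
-- IndexError, and also negative in-range indices, on which A's accesses address rows/columns
-- counted from the end (outside the task's natural domain).
def Pre_solution (n : Int) (A : List (List Int)) (i1 : Int) (j1 : Int) (i2 : Int) (j2 : Int) (k : Int) : Prop :=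
  i1 ≤ i2 → j1 ≤ j2 →
    (0 ≤ i1 ∧ i2 < (A.length : Int) ∧ 0 ≤ j1 ∧
     ∀ row ∈ (A.drop i1.toNat).take ((i2 + 1).toNat - i1.toNat), j2 < (row.length : Int))
instance (n : Int) (A : List (List Int)) (i1 : Int) (j1 : Int) (i2 : Int) (j2 : Int) (k : Int) : Decidable (Pre_solution n A i1 j1 i2 j2 k) := by unfold Pre_solution; infer_instance
def pvWitness_solution : Int × List (List Int) × Int × Int × Int × Int × Int := (2, [[1, 2], [3, 4]], 0, 0, 1, 1, 3)

def Spec_solution (n : Int) (A : List (List Int)) (i1 : Int) (j1 : Int) (i2 : Int) (j2 : Int) (k : Int) (out : Int) : Prop := out = solution_alt n A i1 j1 i2 j2 k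
instance (n : Int) (A : List (List Int)) (i1 : Int) (j1 : Int) (i2 : Int) (j2 : Int) (k : Int) (out : Int) : Decidable (Spec_solution n A i1 j1 i2 j2 k out) := by unfold Spec_solution; infer_instance

-- ===== CLAIM (what is proved, stated in full; the proofs are below) =====
def Claim_equal_solution : Prop := ∀ (n : Int) (A : List (List Int)) (i1 : Int) (j1 : Int) (i2 : Int) (j2 : Int) (k : Int), Dom_solution n A i1 j1 i2 j2 k → Pre_solution n A i1 j1 i2 j2 k → Spec_solution n A i1 j1 i2 j2 k (solution n A i1 j1 i2 j2 k)

-- ===== LEMMAS AND PROOFS =====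

-- sum as a left fold
lemma sumFoldl (l : List Int) (a : Int) : l.foldl (· + ·) a = a + l.sum := by
  induction l generalizing a with
  | nil => simp
  | cons x xs ih => simp [List.foldl_cons, ih (a + x)]; ring

-- A's final summation loop
lemma matSumFoldl (l : List (List Int)) (a : Int) :
    l.foldl (fun acc arr => acc + arr.foldl (· + ·) 0) a = a + (l.map (fun r => r.sum)).sum := by
  induction l generalizing a with
  | nil => simp
  | cons x xs ih => rw [List.map_cons, List.sum_cons, List.foldl_cons, ih, sumFoldl]; ring

lemma foldlConst {α β : Type} (l : List β) (x : α) : l.foldl (fun a _ => a) x = x := by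
  induction l <;> simp [*]

-- one in-place update step on the row, as A performs it
def rowStep (r : List Int) (j : Int) (k : Int) : List Int :=
  match PySem.List.pyGet? r j with
  | none => r
  | some v => PySem.List.pySetD r j (v * k)

-- the inner j-loop only rewrites row i of the matrix
lemma innerFold (k : Int) (js : List Int) :
    ∀ (m : List (List Int)) (i : Int) (row : List Int), 0 ≤ i → m[i.toNat]? = some row →
    js.foldl (fun m' j => pyScaleCell m' i j k) m
      = m.set i.toNat (js.foldl (fun r j => rowStep r j k) row) := by
  induction js with
  | nil =>
    intro m i row hi hget
    have hlt : i.toNat < m.length := by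
      by_contra h
      simp [List.getElem?_eq_none (by omega : m.length ≤ i.toNat)] at hget
    have : m[i.toNat]? = some m[i.toNat] := List.getElem?_eq_getElem hlt
    rw [this] at hget
    simp only [List.foldl_nil]
    rw [show row = m[i.toNat] by exact (Option.some_inj.mp hget).symm]
    exact (List.set_getElem_self hlt).symm
  | cons j js ih =>
    intro m i row hi hget
    have hlt : i.toNat < m.length := by
      by_contra h
      simp [List.getElem?_eq_none (by omega : m.length ≤ i.toNat)] at hget
    simp only [List.foldl_cons]
    have hmi : PySem.List.pyGet? m i = some row := by
      rw [PySem.List.pyGet?_of_nonneg m hi]; exact hget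
    cases hrj : PySem.List.pyGet? row j with
    | none =>
      have h1 : pyScaleCell m i j k = m := by
        simp only [pyScaleCell, hmi, hrj]
      have h2 : rowStep row j k = row := by
        simp only [rowStep, hrj]
      rw [h1, h2]
      exact ih m i row hi hget
    | some v =>
      have h1 : pyScaleCell m i j k = m.set i.toNat (PySem.List.pySetD row j (v * k)) := by
        simp only [pyScaleCell, hmi, hrj]; rw [PySem.List.pySetD_of_nonneg m _ hi]
      have h2 : rowStep row j k = PySem.List.pySetD row j (v * k) := by
        simp only [rowStep, hrj]
      rw [h1, h2]
      rw [ih (m.set i.toNat (PySem.List.pySetD row j (v * k))) i (PySem.List.pySetD row j (v * k)) hi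
        (List.getElem?_set_self (by simpa using hlt))]
      rw [List.set_set]

-- a fold over range(a,b) that rewrites slot i with f at each i is a guarded mapIdx
lemma charFold {α : Type} (f : α → α) (step : List α → Int → List α) (a : Int)
    (hstep : ∀ (m : List α) (i : Int) (x : α), 0 ≤ i → m[i.toNat]? = some x →
      step m i = m.set i.toNat (f x))
    (ha : 0 ≤ a) :
    ∀ (b : Int) (xs : List α), b ≤ (xs.length : Int) →
    (PySem.List.pyRange a b 1).foldl step xs
      = xs.mapIdx (fun i x => if a ≤ (i : Int) ∧ (i : Int) < b then f x else x) := by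
  suffices H : ∀ (d : Nat) (b : Int), (b - a).toNat = d → ∀ xs : List α, b ≤ (xs.length : Int) →
      (PySem.List.pyRange a b 1).foldl step xs
        = xs.mapIdx (fun i x => if a ≤ (i : Int) ∧ (i : Int) < b then f x else x) by
    intro b xs hb; exact H _ b rfl xs hb
  intro d
  induction d with
  | zero =>
    intro b hd xs hb
    have hempty : PySem.List.pyRange a b 1 = [] := by
      rw [PySem.List.pyRange_one, hd]; simp
    rw [hempty, List.foldl_nil]
    apply (List.ext_getElem (by simp) ?_).symm
    intro idx h1 h2
    rw [List.getElem_mapIdx, if_neg (by omega)]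
  | succ d ihd =>
    intro b hd xs hb
    have hab : a ≤ b - 1 := by omega
    have hrange : PySem.List.pyRange a b 1 = PySem.List.pyRange a (b - 1) 1 ++ [b - 1] := by
      have h := PySem.List.pyRange_one_succ_right hab
      rw [show b - 1 + 1 = b by ring] at h
      exact h
    rw [hrange, List.foldl_append, List.foldl_cons, List.foldl_nil]
    rw [ihd (b - 1) (by omega) xs (by omega)]
    set prev := xs.mapIdx (fun i x => if a ≤ (i : Int) ∧ (i : Int) < b - 1 then f x else x) with hprev
    have hblt : (b - 1).toNat < xs.length := by omega
    have hcast : (((b - 1).toNat : Int)) = b - 1 := Int.toNat_of_nonneg (by omega)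
    have hprevget : prev[(b - 1).toNat]? = some xs[(b - 1).toNat] := by
      rw [hprev, List.getElem?_mapIdx, List.getElem?_eq_getElem hblt]
      simp only [Option.map_some, Option.some_inj]
      rw [if_neg (by omega)]
    rw [hstep prev (b - 1) _ (by omega) hprevget]
    apply List.ext_getElem (by simp [hprev])
    intro idx h1 h2
    rw [List.getElem_set]
    by_cases hidx : (b - 1).toNat = idx
    · subst hidx
      rw [if_pos rfl, List.getElem_mapIdx, if_pos (by omega)]
    · rw [if_neg hidx]
      simp only [hprev, List.getElem_mapIdx]
      by_cases hc : a ≤ (idx : Int) ∧ (idx : Int) < b - 1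
      · rw [if_pos hc, if_pos (by omega)]
      · rw [if_neg hc, if_neg (by omega)]

-- summing a guarded mapIdx: base sum plus the delta over the selected window
lemma sum_mapIdx_if {α : Type} (g h : α → Int) :
    ∀ (xs : List α) (a b : Int),
    (xs.mapIdx (fun i x => if a ≤ (i : Int) ∧ (i : Int) < b then g x else h x)).sum
      = (xs.map h).sum + (((xs.drop a.toNat).take (b.toNat - a.toNat)).map (fun x => g x - h x)).sum := by
  intro xs
  induction xs with
  | nil => intro a b; simp
  | cons x xs ih =>
    intro a b
    rw [List.mapIdx_cons, List.sum_cons]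
    have hiff : ∀ (i : Nat), (a ≤ ((i + 1 : Nat) : Int) ∧ ((i + 1 : Nat) : Int) < b) ↔ (a - 1 ≤ (i : Int) ∧ (i : Int) < b - 1) := by
      intro i; push_cast; omega
    simp only [hiff]
    rw [ih (a - 1) (b - 1)]
    by_cases ha0 : a ≤ 0
    · by_cases hb0 : b ≤ 0
      · rw [if_neg (by omega)]
        rw [show a.toNat = 0 by omega, show (a - 1).toNat = 0 by omega,
            show b.toNat = 0 by omega, show (b - 1).toNat = 0 by omega]
        simp only [List.drop_zero, Nat.zero_sub, List.take_zero, List.map_nil, List.sum_nil,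
          List.map_cons, List.sum_cons]
        ring
      · rw [if_pos (by omega)]
        obtain ⟨m, hm⟩ : ∃ m, b.toNat = m + 1 := ⟨b.toNat - 1, by omega⟩
        rw [show a.toNat = 0 by omega, show (a - 1).toNat = 0 by omega]
        rw [List.drop_zero, List.drop_zero, show b.toNat - 0 = m + 1 by omega, List.take_succ_cons]
        rw [show (b - 1).toNat - 0 = m by omega]
        simp only [List.map_cons, List.sum_cons]
        ring
    · rw [if_neg (by omega)]
      obtain ⟨m, hm⟩ : ∃ m, a.toNat = m + 1 := ⟨a.toNat - 1, by omega⟩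
      rw [hm, List.drop_succ_cons, show (a - 1).toNat = m by omega,
          show (b - 1).toNat - m = b.toNat - (m + 1) by omega]
      simp only [List.map_cons, List.sum_cons]
      ring

lemma sum_map_scale (k : Int) (l : List Int) : (l.map (fun v => v * k - v)).sum = (k - 1) * l.sum := by
  induction l with
  | nil => simp
  | cons x xs ih => simp [ih]; ring

-- map after mapIdx composes pointwise
lemma map_mapIdx' {α β γ : Type} (l : List α) (f : Nat → α → β) (g : β → γ) :
    (l.mapIdx f).map g = l.mapIdx (fun i x => g (f i x)) := by
  apply List.ext_getElem (by simp)
  intro i h1 h2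
  simp [List.getElem_mapIdx]

-- rowStep is a plain in-range update
lemma rowStep_set (k : Int) (r : List Int) (j : Int) (x : Int) (hj : 0 ≤ j)
    (hget : r[j.toNat]? = some x) : rowStep r j k = r.set j.toNat (x * k) := by
  simp only [rowStep, PySem.List.pyGet?_of_nonneg r hj, hget]
  exact PySem.List.pySetD_of_nonneg r _ hj

lemma foldlSum (l : List Int) : l.foldl (· + ·) 0 = l.sum := by
  rw [sumFoldl]; ring

-- ===== VERDICT (by name: the statement is the Claim_ definition above) =====
theorem solution_spec : Claim_equal_solution := by
  intro n A i1 j1 i2 j2 k _hdom hpre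
  unfold Spec_solution
  simp only [solution, solution_alt]
  have hfe : ∀ (l : List Int), l.foldl (· + ·) 0 = l.sum := foldlSum
  by_cases hne : i1 ≤ i2 ∧ j1 ≤ j2
  · -- both ranges nonempty
    obtain ⟨hi12, hj12⟩ := hne
    obtain ⟨hI1, hI2, hJ1, hrows⟩ := hpre hi12 hj12
    rw [if_neg (by omega : ¬ (i1 > i2 ∨ j1 > j2))]
    -- characterise the mutated matrix
    have hM := charFold
      (f := fun row => (PySem.List.pyRange j1 (j2 + 1) 1).foldl (fun r j => rowStep r j k) row)
      (step := fun m i => (PySem.List.pyRange j1 (j2 + 1) 1).foldl (fun m' j => pyScaleCell m' i j k) m)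
      (a := i1)
      (fun m i x h1 h2 => innerFold k _ m i x h1 h2) hI1 (i2 + 1) A (by omega)
    rw [hM, matSumFoldl, map_mapIdx']
    have happ : ∀ (i : Nat) (row : List Int),
        List.sum (if i1 ≤ (i : Int) ∧ (i : Int) < i2 + 1
          then (PySem.List.pyRange j1 (j2 + 1) 1).foldl (fun r j => rowStep r j k) row else row)
        = if i1 ≤ (i : Int) ∧ (i : Int) < i2 + 1
          then ((PySem.List.pyRange j1 (j2 + 1) 1).foldl (fun r j => rowStep r j k) row).sum
          else row.sum :=
      fun i row => apply_ite List.sum _ _ _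
    simp only [happ]
    rw [sum_mapIdx_if (fun row => ((PySem.List.pyRange j1 (j2 + 1) 1).foldl (fun r j => rowStep r j k) row).sum)
      (fun row => row.sum) A i1 (i2 + 1)]
    -- rewrite the per-row delta on the selected rows
    rw [List.map_congr_left
      (l := List.take ((i2 + 1).toNat - i1.toNat) (List.drop i1.toNat A))
      (f := fun x => ((PySem.List.pyRange j1 (j2 + 1) 1).foldl (fun r j => rowStep r j k) x).sum - x.sum)
      (g := fun row => (k - 1) * ((row.drop j1.toNat).take ((j2 + 1).toNat - j1.toNat)).sum)
      (by
        intro row hrow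
        simp only
        have hlen := hrows row hrow
        have hR := charFold (f := fun v => v * k) (step := fun r j => rowStep r j k) (a := j1)
          (fun r j x h1 h2 => rowStep_set k r j x h1 h2) hJ1 (j2 + 1) row (by omega)
        rw [hR, sum_mapIdx_if (fun v => v * k) (fun v => v) row j1 (j2 + 1)]
        simp only [List.map_id_fun', id]
        rw [sum_map_scale]
        ring)]
    rw [List.sum_map_mul_left]
    -- B side
    have hsl : ∀ (row : List Int), PySem.List.slice row (some j1) (some (j2 + 1))
        = List.take ((j2 + 1).toNat - j1.toNat) (List.drop j1.toNat row) :=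
      fun row => PySem.List.slice_toNat row hJ1 (by omega)
    rw [PySem.List.slice_toNat A hI1 (by omega)]
    simp only [hsl, hfe]
    ring
  · -- an empty index range: the matrix is unchanged
    have hm : (PySem.List.pyRange i1 (i2 + 1) 1).foldl
        (fun m i => (PySem.List.pyRange j1 (j2 + 1) 1).foldl (fun m' j => pyScaleCell m' i j k) m) A = A := by
      by_cases hi : i1 ≤ i2
      · have hj : ¬ j1 ≤ j2 := fun h => hne ⟨hi, h⟩
        have hjr : PySem.List.pyRange j1 (j2 + 1) 1 = [] := by
          rw [PySem.List.pyRange_one, show (j2 + 1 - j1).toNat = 0 by omega]; simp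
        simp only [hjr, List.foldl_nil]
        exact foldlConst _ _
      · have hir : PySem.List.pyRange i1 (i2 + 1) 1 = [] := by
          rw [PySem.List.pyRange_one, show (i2 + 1 - i1).toNat = 0 by omega]; simp
        rw [hir, List.foldl_nil]
    rw [hm, if_pos (by omega : i1 > i2 ∨ j1 > j2)]
    rw [matSumFoldl]
    simp only [hfe]
    ring
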